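-- pv_equiv track=rewrite | github.com/wingskh/CompetitiveProgrammingExercises | LeetCode/Kth_Smallest_Element_in_a_Sorted_Matrix.py | countSmallerThanMid
-- ===== SOURCE A (Python) =====
-- def countSmallerThanMid(matrix, mid_value, num_of_rows):
--     column = num_of_rows - 1
--     row = 0
--     count = 0
--     while column >= 0 and row < num_of_rows:
--         if matrix[row][column] <= mid_value:
--             count += column + 1
--             row += 1
--         else:
--             column -= 1
--
--     return count
-- ===== SOURCE B (Python) =====
-- def countSmallerThanMid(matrix, mid_value, num_of_rows):
--     # Row-by-row: keep an exclusive column bound; in each row the new bound is the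
--     # position after the last element <= mid_value within the current bound.
--     bound = num_of_rows
--     count = 0
--     for r in range(num_of_rows):
--         bound = max((c + 1 for c in range(bound) if matrix[r][c] <= mid_value), default=0)
--         if bound == 0:
--             break
--         count += bound
--     return count
-- ===== Notes on version B (the rewrite author's own statement) =====
-- stated objective: alternative
-- what changed: Replaces the single two-pointer staircase walk (one interleaved while loop over row/column state) with a row-major pass that recomputes, per row, the position after the last element <= mid within a shrinking column bound via a max over a forward scan.
-- outside the precondition, e.g. on countSmallerThanMid([[9, 9], [1]], 0, 2): A returns 0, B returns 0
import Mathlib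
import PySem

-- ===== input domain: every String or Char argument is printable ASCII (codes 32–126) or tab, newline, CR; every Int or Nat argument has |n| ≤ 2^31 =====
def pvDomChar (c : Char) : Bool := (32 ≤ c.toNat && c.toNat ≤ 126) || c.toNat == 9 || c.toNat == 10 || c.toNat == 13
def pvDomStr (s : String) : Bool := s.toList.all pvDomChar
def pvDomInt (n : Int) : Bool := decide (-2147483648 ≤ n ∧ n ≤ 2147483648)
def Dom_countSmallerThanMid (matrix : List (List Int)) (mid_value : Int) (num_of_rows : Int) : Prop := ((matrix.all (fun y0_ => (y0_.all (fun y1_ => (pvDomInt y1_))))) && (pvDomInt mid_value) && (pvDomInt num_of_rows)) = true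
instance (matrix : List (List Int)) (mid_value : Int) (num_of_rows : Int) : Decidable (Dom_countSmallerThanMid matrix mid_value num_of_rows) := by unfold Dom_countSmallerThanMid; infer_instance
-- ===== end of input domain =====

-- B replaces A's two-pointer staircase walk by a row-major pass with a per-row forward
-- max-scan for the new column bound: an alternative decomposition of the same count.

-- ===== PORT A =====
-- matrix[r][c]: Python raises IndexError when out of range; Pre_ keeps those inputs out,
-- so the default 0 is never read inside Pre_.
def pvGet2 (matrix : List (List Int)) (r c : Int) : Int :=
  (PySem.List.pyGet? ((PySem.List.pyGet? matrix r).getD []) c).getD 0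

def countA_loop (matrix : List (List Int)) (mid_value num_of_rows : Int)
    (column row count : Int) : Int :=
  if h : 0 ≤ column ∧ row < num_of_rows then
    if pvGet2 matrix row column ≤ mid_value then
      countA_loop matrix mid_value num_of_rows column (row + 1) (count + column + 1)
    else
      countA_loop matrix mid_value num_of_rows (column - 1) row count
  else count
termination_by ((column + 1).toNat + (num_of_rows - row).toNat)
decreasing_by all_goals omega

def countSmallerThanMid (matrix : List (List Int)) (mid_value : Int) (num_of_rows : Int) : Int :=
  countA_loop matrix mid_value num_of_rows (num_of_rows - 1) 0 0

-- ===== PORT B =====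
-- max((c + 1 for c in range(bound) if matrix[r][c] <= mid_value), default=0)
def pvNewBound (matrix : List (List Int)) (mid_value r bound : Int) : Int :=
  (PySem.List.pyRange 0 bound 1).foldl
    (fun acc c => if pvGet2 matrix r c ≤ mid_value then max acc (c + 1) else acc) 0

def countB_loop (matrix : List (List Int)) (mid_value : Int)
    (rows : List Int) (bound count : Int) : Int :=
  match rows with
  | [] => count
  | r :: rest =>
      let b := pvNewBound matrix mid_value r bound
      if b = 0 then count else countB_loop matrix mid_value rest b (count + b)

def countSmallerThanMid_alt (matrix : List (List Int)) (mid_value : Int) (num_of_rows : Int) : Int :=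
  countB_loop matrix mid_value (PySem.List.pyRange 0 num_of_rows 1) num_of_rows 0

-- ===== PRECONDITION & SPEC =====
-- Pre_ excludes the inputs where Python's matrix[row][column] raises IndexError: it asks
-- the first num_of_rows rows to exist and each to have at least num_of_rows columns.
-- This closed-form condition is slightly narrower than A's path-dependent no-crash set:
-- e.g. on ([[9, 9], [1]], 0, 2) A stops before reaching the short row and returns 0 (B too).
def Pre_countSmallerThanMid (matrix : List (List Int)) (mid_value : Int) (num_of_rows : Int) : Prop :=
  num_of_rows ≤ matrix.length ∧
    ∀ r ∈ matrix.take num_of_rows.toNat, num_of_rows ≤ (r.length : Int)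
instance (matrix : List (List Int)) (mid_value : Int) (num_of_rows : Int) : Decidable (Pre_countSmallerThanMid matrix mid_value num_of_rows) := by unfold Pre_countSmallerThanMid; infer_instance

def pvWitness_countSmallerThanMid : List (List Int) × Int × Int := ([[1, 2], [3, 4]], 2, 2)

def Spec_countSmallerThanMid (matrix : List (List Int)) (mid_value : Int) (num_of_rows : Int) (out : Int) : Prop := out = countSmallerThanMid_alt matrix mid_value num_of_rows
instance (matrix : List (List Int)) (mid_value : Int) (num_of_rows : Int) (out : Int) : Decidable (Spec_countSmallerThanMid matrix mid_value num_of_rows out) := by unfold Spec_countSmallerThanMid; infer_instance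

-- ===== CLAIM (what is proved, stated in full; the proofs are below) =====
def Claim_equal_countSmallerThanMid : Prop := ∀ (matrix : List (List Int)) (mid_value : Int) (num_of_rows : Int), Dom_countSmallerThanMid matrix mid_value num_of_rows → Pre_countSmallerThanMid matrix mid_value num_of_rows → Spec_countSmallerThanMid matrix mid_value num_of_rows (countSmallerThanMid matrix mid_value num_of_rows)

-- ===== LEMMAS AND PROOFS =====

-- splitting off the top column of the scan
theorem pvNewBound_succ (matrix : List (List Int)) (mid_value r : Int) (k : Nat) :
    pvNewBound matrix mid_value r ((k : Int) + 1) =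
      if pvGet2 matrix r k ≤ mid_value then max (pvNewBound matrix mid_value r k) ((k : Int) + 1)
      else pvNewBound matrix mid_value r k := by
  unfold pvNewBound
  rw [PySem.List.pyRange_one_succ_right (by positivity), List.foldl_append]
  simp

-- bounds of the per-row max-scan
theorem pvNewBound_bounds (matrix : List (List Int)) (mid_value r : Int) :
    ∀ (b : Nat), 0 ≤ pvNewBound matrix mid_value r b ∧ pvNewBound matrix mid_value r b ≤ b := by
  intro b
  induction b with
  | zero => simp [pvNewBound]
  | succ k ih =>
    have hcast : ((k + 1 : Nat) : Int) = (k : Int) + 1 := by push_cast; ring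
    rw [hcast, pvNewBound_succ]
    split <;> omega

-- one row of A's staircase = one per-row max-scan of B
theorem step_lemma (matrix : List (List Int)) (mid_value n : Int) :
    ∀ (k : Nat) (row count : Int), row < n →
      countA_loop matrix mid_value n (k : Int) row count =
        (if pvNewBound matrix mid_value row ((k : Int) + 1) = 0 then count
         else countA_loop matrix mid_value n
           (pvNewBound matrix mid_value row ((k : Int) + 1) - 1) (row + 1)
           (count + pvNewBound matrix mid_value row ((k : Int) + 1))) := by
  intro k
  induction k with
  | zero =>
    intro row count hrow
    have h1 : pvNewBound matrix mid_value row ((0 : Nat) + 1 : Int) =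
        if pvGet2 matrix row 0 ≤ mid_value then 1 else 0 := by
      have := pvNewBound_succ matrix mid_value row 0
      simpa [pvNewBound, PySem.List.pyRange_zero_nat] using this
    rw [countA_loop, dif_pos ⟨le_refl 0, hrow⟩]
    push_cast at h1 ⊢
    by_cases hg : pvGet2 matrix row 0 ≤ mid_value
    · rw [if_pos hg, h1, if_pos hg, if_neg (by norm_num)]
      norm_num
    · rw [if_neg hg, h1, if_neg hg, if_pos rfl]
      rw [countA_loop, dif_neg (by omega)]
  | succ k ih =>
    intro row count hrow
    have hcast : ((k + 1 : Nat) : Int) = (k : Int) + 1 := by push_cast; ring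
    have hb := pvNewBound_bounds matrix mid_value row (k + 1)
    rw [hcast] at hb
    have hsucc := pvNewBound_succ matrix mid_value row (k + 1)
    push_cast at hsucc
    rw [hcast, countA_loop, dif_pos ⟨by positivity, hrow⟩]
    by_cases hg : pvGet2 matrix row ((k : Int) + 1) ≤ mid_value
    · rw [if_pos hg]
      rw [hsucc, if_pos hg]
      have hmax : max (pvNewBound matrix mid_value row ((k : Int) + 1)) ((k : Int) + 1 + 1)
          = (k : Int) + 1 + 1 := by omega
      rw [hmax, if_neg (by omega)]
      norm_num
      ring_nf
    · rw [if_neg hg, hsucc, if_neg hg]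
      have : (k : Int) + 1 - 1 = (k : Int) := by ring
      rw [this, ih row count hrow]

theorem main_lemma (matrix : List (List Int)) (mid_value n : Int) :
    ∀ (d : Nat) (i bound count : Int), 0 ≤ bound → n - i ≤ (d : Int) →
      countA_loop matrix mid_value n (bound - 1) i count =
        countB_loop matrix mid_value (PySem.List.pyRange i n 1) bound count := by
  intro d
  induction d with
  | zero =>
    intro i bound count hb hd
    have hin : n ≤ i := by omega
    rw [PySem.List.pyRange_one_eq_nil hin, countB_loop, countA_loop, dif_neg (by omega)]
  | succ d ih =>
    intro i bound count hb hd
    by_cases hin : n ≤ i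
    · rw [PySem.List.pyRange_one_eq_nil hin, countB_loop, countA_loop, dif_neg (by omega)]
    · have hiltn : i < n := by omega
      rw [PySem.List.pyRange_one_cons hiltn, countB_loop]
      by_cases hb0 : bound = 0
      · subst hb0
        rw [countA_loop, dif_neg (by omega)]
        simp [pvNewBound]
      · have hbpos : 1 ≤ bound := by omega
        set k : Nat := (bound - 1).toNat with hk
        have hkcast : (k : Int) = bound - 1 := by omega
        have hstep := step_lemma matrix mid_value n k i count hiltn
        rw [hkcast] at hstep
        have hb1 : bound - 1 + 1 = bound := by ring
        rw [hb1] at hstep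
        rw [hstep]
        have hbounds := pvNewBound_bounds matrix mid_value i (k + 1)
        have hkc : ((k + 1 : Nat) : Int) = bound := by omega
        rw [hkc] at hbounds
        by_cases hz : pvNewBound matrix mid_value i bound = 0
        · rw [if_pos hz, hz]
          simp
        · rw [if_neg hz, if_neg hz]
          exact ih (i + 1) _ _ (by omega) (by omega)

-- ===== VERDICT (by name: the statement is the Claim_ definition above) =====
theorem countSmallerThanMid_spec : Claim_equal_countSmallerThanMid := by
  intro matrix mid_value num_of_rows _hdom _hpre
  unfold Spec_countSmallerThanMid countSmallerThanMid countSmallerThanMid_alt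
  by_cases hn : 0 ≤ num_of_rows
  · exact main_lemma matrix mid_value num_of_rows num_of_rows.toNat 0 num_of_rows 0 hn (by omega)
  · rw [countA_loop, dif_neg (by omega), PySem.List.pyRange_one_eq_nil (by omega), countB_loop]
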